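-- pv_equiv track=rewrite | github.com/fattypiggy/sam-hq | train/data/fiber/copy_fused_images.py | ensure_unique_names
-- ===== SOURCE A (Python) =====
-- from collections import defaultdict
--
-- def ensure_unique_names(fused_files):
--     """
--     Ensure all parent directory names are unique by adding suffixes if needed.
--     Returns a dictionary mapping original names to unique names.
--     """
--     name_counts = defaultdict(int)
--     unique_names = {}
--
--     for _, parent_name in fused_files:
--         name_counts[parent_name] += 1
--
--     # Create unique names for duplicates
--     for parent_name, count in name_counts.items():
--         if count == 1:
--             unique_names[parent_name] = parent_name
--         else:
--             # Add suffix for duplicates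
--             for i in range(count):
--                 if i == 0:
--                     unique_names[f"{parent_name}"] = parent_name
--                 else:
--                     unique_names[f"{parent_name}_{i+1}"] = f"{parent_name}_{i+1}"
--
--     return unique_names
-- ===== SOURCE B (Python) =====
-- def ensure_unique_names(fused_files):
--     """
--     Ensure all parent directory names are unique by adding suffixes if needed.
--     Returns a dictionary mapping original names to unique names.
--     """
--     unique_names = {}
--     names = [name for _, name in fused_files]
--     while names:
--         head = names[0]
--         count = names.count(head)
--         for i in range(1, count + 1):
--             key = head if i == 1 else f"{head}_{i}"
--             unique_names[key] = key
--         names = [n for n in names[1:] if n != head]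
--     return unique_names
-- ===== Notes on version B (the rewrite author's own statement) =====
-- stated objective: alternative
-- what changed: Drops A's counting dict entirely: B is a worklist loop that repeatedly takes the first remaining name, counts its occurrences with list.count, emits that whole suffix group, and filters all copies of that name out of the worklist before continuing.
import Mathlib
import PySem

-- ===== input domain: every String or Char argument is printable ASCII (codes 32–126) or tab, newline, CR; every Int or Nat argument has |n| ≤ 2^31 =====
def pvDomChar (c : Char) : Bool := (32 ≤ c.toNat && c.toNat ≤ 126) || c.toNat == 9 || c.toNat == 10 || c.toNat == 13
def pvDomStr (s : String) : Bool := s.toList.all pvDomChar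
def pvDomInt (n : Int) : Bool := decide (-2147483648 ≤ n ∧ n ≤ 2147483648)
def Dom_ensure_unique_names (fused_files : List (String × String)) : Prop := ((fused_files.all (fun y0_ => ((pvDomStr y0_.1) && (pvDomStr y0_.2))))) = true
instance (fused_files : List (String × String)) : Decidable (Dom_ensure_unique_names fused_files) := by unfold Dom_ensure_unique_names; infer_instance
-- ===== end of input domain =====

-- B drops A's counting dict: a worklist loop emits each first remaining name's whole
-- suffix group and filters that name out before continuing (alternative; not faster).

-- the f-string f"{name}_{i}" (shared by both Pythons)
def pvSfx (name : String) (i : Int) : String := PySem.Str.join "" [name, "_", PySem.Int.toStr i]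

-- ===== PORT A =====
def ensure_unique_names (fused_files : List (String × String)) : List (String × String) :=
  let name_counts : PySem.Dict String Int :=
    fused_files.foldl (fun d p => d.modify p.2 0 (· + 1)) PySem.Dict.empty
  let unique_names : PySem.Dict String String :=
    name_counts.items.foldl (fun u q =>
      if q.2 == 1 then u.insert q.1 q.1
      else (PySem.List.pyRange 0 q.2 1).foldl (fun u i =>
        if i == 0 then u.insert q.1 q.1
        else u.insert (pvSfx q.1 (i + 1)) (pvSfx q.1 (i + 1))) u) PySem.Dict.empty
  unique_names.items

-- ===== PORT B =====
-- B's inner for-loop: emit the suffix group for one name with multiplicity c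
def pvGroup (head : String) (c : Int) (u : PySem.Dict String String) : PySem.Dict String String :=
  (PySem.List.pyRange 1 (c + 1) 1).foldl (fun u i =>
    let key := if i == 1 then head else pvSfx head i
    u.insert key key) u

-- B's while-loop over the shrinking worklist of names
def pvEmit (names : List String) (u : PySem.Dict String String) : PySem.Dict String String :=
  match names with
  | [] => u
  | head :: rest =>
    pvEmit (rest.filter (fun n => n != head)) (pvGroup head (((head :: rest).count head : Int)) u)
termination_by names.length
decreasing_by simpa using Nat.lt_succ_of_le (List.length_filter_le _ _)

def ensure_unique_names_alt (fused_files : List (String × String)) : List (String × String) :=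
  (pvEmit (fused_files.map (fun p => p.2)) PySem.Dict.empty).items

-- ===== PRECONDITION & SPEC =====
def Spec_ensure_unique_names (fused_files : List (String × String)) (out : List (String × String)) : Prop := out = ensure_unique_names_alt fused_files
instance (fused_files : List (String × String)) (out : List (String × String)) : Decidable (Spec_ensure_unique_names fused_files out) := by unfold Spec_ensure_unique_names; infer_instance

-- ===== CLAIM (what is proved, stated in full; the proofs are below) =====
def Claim_equal_ensure_unique_names : Prop := ∀ (fused_files : List (String × String)), Dom_ensure_unique_names fused_files → Spec_ensure_unique_names fused_files (ensure_unique_names fused_files)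

-- ===== LEMMAS AND PROOFS =====

-- per item of A's counts dict: A's branchy emission equals B's pvGroup
lemma pv_item_lemma (name : String) (c : Int) (u : PySem.Dict String String) :
    (if c == 1 then u.insert name name
     else (PySem.List.pyRange 0 c 1).foldl (fun u i =>
       if i == 0 then u.insert name name
       else u.insert (pvSfx name (i + 1)) (pvSfx name (i + 1))) u)
    = pvGroup name c u := by
  unfold pvGroup
  by_cases hc : c = 1
  · subst hc
    have h2 : PySem.List.pyRange 1 2 1 = [1] := PySem.List.pyRange_one_singleton 1
    norm_num [h2]
  · simp only [beq_iff_eq, hc, if_false]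
    rw [PySem.List.pyRange_one 0 c, PySem.List.pyRange_one 1 (c + 1)]
    have h0 : (c - 0).toNat = c.toNat := by omega
    have h1 : (c + 1 - 1).toNat = c.toNat := by omega
    rw [h0, h1, List.foldl_map, List.foldl_map]
    apply PySem.List.foldl_congr_mem
    intro u k _
    rcases k with _ | k
    · simp
    · push_cast
      rw [if_neg (by omega), if_neg (by omega)]
      have h : (0 : Int) + ((k : Int) + 1) + 1 = 1 + ((k : Int) + 1) := by ring
      rw [h]

-- prepending a fresh element to a Set commutes with further adds
lemma pv_foldl_add_cons (l : List String) (s : PySem.Set String) (x : String)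
    (hx : ∀ y ∈ l, y ≠ x) :
    l.foldl PySem.Set.add (x :: s) = x :: l.foldl PySem.Set.add s := by
  induction l generalizing s with
  | nil => rfl
  | cons h t ih =>
    have hne : (h == x) = false := by simp [hx h (by simp)]
    have hxh : ¬ h = x := hx h (by simp)
    have : PySem.Set.add (x :: s) h = x :: PySem.Set.add s h := by
      simp only [PySem.Set.add, PySem.Set.contains, List.contains_cons, hne,
        Bool.false_or]
      split <;> rfl
    rw [List.foldl_cons, List.foldl_cons, this,
        ih _ (fun y hy => hx y (List.mem_cons_of_mem _ hy))]

-- adds of elements already present are no-ops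
lemma pv_foldl_add_filter (l : List String) (s : PySem.Set String) (x : String)
    (hx : s.contains x = true) :
    l.foldl PySem.Set.add s = (l.filter (fun n => n != x)).foldl PySem.Set.add s := by
  induction l generalizing s with
  | nil => rfl
  | cons h t ih =>
    by_cases hh : h = x
    · subst hh
      have hm : h ∈ s := by simpa [PySem.Set.contains] using hx
      have : PySem.Set.add s h = s := by simp [PySem.Set.add, PySem.Set.contains, hm]
      simp [this, ih s hx]
    · have hb : (h != x) = true := by simp [hh]
      rw [List.filter_cons, if_pos hb, List.foldl_cons, List.foldl_cons]
      refine ih _ ?_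
      simp only [PySem.Set.add]
      split
      · exact hx
      · have hm : x ∈ s := by simpa [PySem.Set.contains] using hx
        simp [PySem.Set.contains, hm]

-- Set.ofList peels off the first name together with all its later copies
lemma pv_ofList_cons (h : String) (t : List String) :
    PySem.Set.ofList (h :: t) = h :: PySem.Set.ofList (t.filter (fun n => n != h)) := by
  rw [PySem.Set.ofList_eq_foldl, PySem.Set.ofList_eq_foldl, List.foldl_cons]
  have hadd : PySem.Set.add ([] : PySem.Set String) h = [h] := rfl
  rw [hadd, pv_foldl_add_filter t [h] h (by simp [PySem.Set.contains])]
  exact pv_foldl_add_cons _ [] h (fun y hy => by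
    have := List.of_mem_filter hy; simpa using this)

-- A's counting loop over the pairs is Counter over the projected names
lemma pv_counts_eq (ff : List (String × String)) :
    ff.foldl (fun d p => d.modify p.2 0 (· + 1)) PySem.Dict.empty
    = PySem.Dict.counter (ff.map (fun p => p.2)) := by
  rw [PySem.Dict.counter_eq_foldl, List.foldl_map]

-- B's worklist recursion computes A's grouped fold over the distinct names
lemma pv_emit_eq (names : List String) (u : PySem.Dict String String) :
    pvEmit names u
    = (PySem.Set.ofList names).foldl (fun u k => pvGroup k ((names.count k : Int)) u) u := by
  induction hn : names.length using Nat.strong_induction_on generalizing names u with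
  | _ n ih =>
  match names with
  | [] => simp [pvEmit, PySem.Set.ofList]
  | head :: rest =>
    rw [pvEmit, pv_ofList_cons, List.foldl_cons]
    have hlen : (rest.filter (fun n => n != head)).length < n := by
      subst hn
      simpa using Nat.lt_succ_of_le (List.length_filter_le _ _)
    rw [ih _ hlen _ _ rfl]
    apply PySem.List.foldl_congr_mem
    intro u k hk
    have hkmem := List.of_mem_filter ((PySem.Set.mem_ofList _ k).mp hk)
    have hkne : k ≠ head := by simpa using hkmem
    have hcount : (rest.filter (fun n => n != head)).count k = (head :: rest).count k := by
      rw [List.count_cons]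
      simp only [beq_iff_eq]
      rw [if_neg (fun h => hkne h.symm), Nat.add_zero, List.count_filter (by simp [hkne])]
    rw [hcount]

-- ===== VERDICT (by name: the statement is the Claim_ definition above) =====
theorem ensure_unique_names_spec : Claim_equal_ensure_unique_names := by
  intro fused_files _
  unfold Spec_ensure_unique_names
  simp only [ensure_unique_names, ensure_unique_names_alt]
  rw [pv_counts_eq, PySem.Dict.items_counter, List.foldl_map, pv_emit_eq]
  apply congrArg
  apply PySem.List.foldl_congr_mem
  intro u k _
  exact pv_item_lemma k _ u
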